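-- pv_equiv track=rewrite | github.com/canfieldjuan/atlas_web_ui | atlas_brain/capabilities/device_resolver.py | _generate_aliases
-- ===== SOURCE A (Python) =====
-- def _generate_aliases(name: str) -> list[str]:
--     """
--     Generate shorter alias variants of a device name.
--
--     "32 Philips Roku TV" -> ["32 Philips Roku TV", "Philips Roku TV", "Roku TV", "TV"]
--     "Kitchen Light" -> ["Kitchen Light", "Kitchen"]
--     """
--     aliases = [name]
--     words = name.split()
--     if len(words) <= 1:
--         return aliases
--
--     # Progressive trimming from the left
--     for i in range(1, len(words)):
--         alias = " ".join(words[i:])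
--         if len(alias) >= 2:
--             aliases.append(alias)
--
--     return aliases
-- ===== SOURCE B (Python) =====
-- def _generate_aliases(name: str) -> list[str]:
--     aliases = [name]
--     words = name.split()
--     if len(words) <= 1:
--         return aliases
--
--     # Build the trimmed suffixes incrementally from the right, then reverse.
--     acc = None
--     tmp = []
--     for w in reversed(words[1:]):
--         acc = w if acc is None else w + " " + acc
--         if len(acc) >= 2:
--             tmp.append(acc)
--     return aliases + tmp[::-1]
-- ===== Notes on version B (the rewrite author's own statement) =====
-- stated objective: alternative
-- what changed: Instead of re-joining the slice words[i:] for every i (quadratic re-joining), B walks words[1:] once from the right, extending a running suffix string by one word per step, collects the qualifying suffixes shortest-first and reverses them.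
import Mathlib
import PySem

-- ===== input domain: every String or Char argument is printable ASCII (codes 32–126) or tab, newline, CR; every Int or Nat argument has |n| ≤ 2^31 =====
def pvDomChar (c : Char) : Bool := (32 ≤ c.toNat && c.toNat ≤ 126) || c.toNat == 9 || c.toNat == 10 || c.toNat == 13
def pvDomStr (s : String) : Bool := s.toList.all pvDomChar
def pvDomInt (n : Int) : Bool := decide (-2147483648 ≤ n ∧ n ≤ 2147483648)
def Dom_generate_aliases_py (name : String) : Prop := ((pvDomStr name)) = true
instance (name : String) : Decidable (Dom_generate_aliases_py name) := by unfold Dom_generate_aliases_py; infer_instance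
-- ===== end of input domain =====

-- B replaces A's per-index re-join of words[i:] with a single right-to-left pass
-- that extends a running suffix string one word at a time (alternative decomposition).


-- ===== PORT A =====
def generate_aliases_py (name : String) : List String :=
  let aliases := [name]
  let words := PySem.Str.split₀ name
  if words.length ≤ 1 then aliases
  else
    (PySem.List.pyRange 1 (words.length : Int) 1).foldl
      (fun aliases i =>
        let al := PySem.Str.join " " (PySem.List.slice words (some i) none)
        if 2 ≤ PySem.Str.len al then aliases ++ [al] else aliases)
      aliases

-- ===== PORT B =====
def generate_aliases_py_alt (name : String) : List String :=
  let aliases := [name]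
  let words := PySem.Str.split₀ name
  if words.length ≤ 1 then aliases
  else
    let st := ((PySem.List.slice words (some 1) none).reverse).foldl
      (fun (s : Option String × List String) w =>
        let acc := match s.1 with
          | none => w
          | some a => w ++ " " ++ a
        (some acc, if 2 ≤ PySem.Str.len acc then s.2 ++ [acc] else s.2))
      ((none : Option String), ([] : List String))
    aliases ++ st.2.reverse

-- ===== PRECONDITION & SPEC =====
def Spec_generate_aliases_py (name : String) (out : List String) : Prop := out = generate_aliases_py_alt name
instance (name : String) (out : List String) : Decidable (Spec_generate_aliases_py name out) := by unfold Spec_generate_aliases_py; infer_instance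

-- ===== CLAIM (what is proved, stated in full; the proofs are below) =====
def Claim_equal_generate_aliases_py : Prop := ∀ (name : String), Dom_generate_aliases_py name → Spec_generate_aliases_py name (generate_aliases_py name)

-- ===== LEMMAS AND PROOFS =====

-- the suffix aliases of a word list r: " ".join(r[k:]) for k = 0 .. len(r)-1, kept when length ≥ 2
def pvF (r : List String) : List String :=
  ((List.range r.length).map (fun k => PySem.Str.join " " (r.drop k))).filter
    (fun s => decide (2 ≤ PySem.Str.len s))

theorem pvJoin_singleton (w : String) : PySem.Str.join " " [w] = w := by
  simp [PySem.Str.join, PySem.Chars.join_singleton]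

theorem pvJoin_cons (w y : String) (l : List String) :
    PySem.Str.join " " (w :: y :: l) = w ++ " " ++ PySem.Str.join " " (y :: l) := by
  simp [PySem.Str.join, PySem.Chars.join_cons_cons]
  apply String.ext
  simp

theorem pvF_cons (w : String) (t : List String) :
    pvF (w :: t) =
      (List.filter (fun s => decide (2 ≤ PySem.Str.len s)) [PySem.Str.join " " (w :: t)]) ++ pvF t := by
  simp only [pvF, List.length_cons, List.range_succ_eq_map, List.map_cons, List.map_map,
    List.filter_cons, Function.comp_def, List.drop_succ_cons, List.drop_zero]
  split <;> simp

theorem pvBfold (r : List String) :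
    r.reverse.foldl
      (fun (s : Option String × List String) w =>
        let acc := match s.1 with
          | none => w
          | some a => w ++ " " ++ a
        (some acc, if 2 ≤ PySem.Str.len acc then s.2 ++ [acc] else s.2))
      ((none : Option String), ([] : List String))
    = ((if r.isEmpty then none else some (PySem.Str.join " " r)), (pvF r).reverse) := by
  induction r with
  | nil => simp [pvF]
  | cons w t ih =>
    rw [List.reverse_cons, List.foldl_append, ih]
    cases t with
    | nil =>
      simp only [List.foldl_cons, List.foldl_nil, List.isEmpty_nil, if_pos, pvF, pvJoin_singleton]
      split <;> simp_all [pvJoin_singleton]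
    | cons y t' =>
      simp only [List.foldl_cons, List.foldl_nil, List.isEmpty_cons, if_neg, Bool.false_eq_true,
        not_false_iff, pvF_cons (w := w), pvJoin_cons, List.reverse_append, List.filter_cons,
        List.filter_nil]
      split <;> simp_all

theorem pvAside (name' : String) (words : List String) :
    (PySem.List.pyRange 1 (words.length : Int) 1).foldl
      (fun aliases i =>
        let al := PySem.Str.join " " (PySem.List.slice words (some i) none)
        if 2 ≤ PySem.Str.len al then aliases ++ [al] else aliases)
      [name']
    = [name'] ++ pvF words.tail := by
  have h := PySem.List.foldl_append_ite
    (fun i => 2 ≤ PySem.Str.len (PySem.Str.join " " (PySem.List.slice words (some i) none)))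
    (fun i => PySem.Str.join " " (PySem.List.slice words (some i) none))
    (PySem.List.pyRange 1 (words.length : Int) 1) [name']
  refine h.trans ?_
  have hlen : ((words.length : Int) - 1).toNat = words.tail.length := by
    simp [List.length_tail]
  have hpt : ∀ k : Nat, PySem.List.slice words (some ((1:Int) + k)) none = words.tail.drop k := by
    intro k
    have h1 : (1 : Int) + (k : Int) = ((1 + k : Nat) : Int) := by push_cast; ring
    rw [h1, PySem.List.slice_from_natCast, ← List.drop_one, List.drop_drop]
  rw [PySem.List.pyRange_one, pvF, hlen]
  simp only [List.filter_map, List.map_map, Function.comp_def, hpt]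

-- ===== VERDICT (by name: the statement is the Claim_ definition above) =====
theorem generate_aliases_py_spec : Claim_equal_generate_aliases_py := by
  intro name _
  unfold Spec_generate_aliases_py generate_aliases_py generate_aliases_py_alt
  simp only
  split
  · rfl
  · rw [pvAside, PySem.List.slice_from_one, pvBfold]
    simp
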